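-- pv_equiv track=rewrite | github.com/tomcant/advent-of-code | 2025/python/solutions/10/solution.py | part1
-- ===== SOURCE A (Python) =====
-- from collections import deque
--
-- def part1(machines):
--     solutions = []
--
--     for machine in machines:
--         lights, buttons, _ = machine
--
--         initial = (False,) * len(lights)
--         queue = deque([(initial, 0)])
--         seen = set()
--
--         while len(queue) > 0:
--             state, presses = queue.popleft()
--
--             if state == tuple(lights):
--                 solutions.append(presses)
--                 break
--
--             if state in seen:
--                 continue
--
--             seen.add(state)
--
--             for button in buttons:
--                 new_state = tuple(
--                     not light if i in button else light for i, light in enumerate(state)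
--                 )
--                 queue.append((new_state, presses + 1))
--
--     return sum(solutions)
-- ===== SOURCE B (Python) =====
-- def part1(machines):
--     total = 0
--     for lights, buttons, _ in machines:
--         n = len(lights)
--         target = 0
--         for l in reversed(lights):
--             target = 2 * target + (1 if l else 0)
--         masks = []
--         for button in buttons:
--             m = 0
--             for i in reversed(range(n)):
--                 m = 2 * m + (1 if i in button else 0)
--             masks.append(m)
--         # subset-XOR DP: best[x] = min number of buttons whose masks XOR to x
--         best = {0: 0}
--         for m in masks:
--             nd = dict(best)
--             for x, c in best.items():
--                 y = x ^ m
--                 if y not in nd or c + 1 < nd[y]: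
--                     nd[y] = c + 1
--             best = nd
--         if target in best:
--             total += best[target]
--     return total
-- ===== Notes on version B (the rewrite author's own statement) =====
-- stated objective: faster
-- what changed: A's per-machine breadth-first search over bool-tuple light states (FIFO queue with duplicated states, seen set) is replaced by encoding buttons and target as integer bitmasks and running a subset-XOR dynamic programme over the buttons: a dict mapping each reachable XOR value to the minimum number of buttons producing it, read off at the target mask; this equals BFS distance since repeated presses cancel over GF(2).
import Mathlib
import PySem

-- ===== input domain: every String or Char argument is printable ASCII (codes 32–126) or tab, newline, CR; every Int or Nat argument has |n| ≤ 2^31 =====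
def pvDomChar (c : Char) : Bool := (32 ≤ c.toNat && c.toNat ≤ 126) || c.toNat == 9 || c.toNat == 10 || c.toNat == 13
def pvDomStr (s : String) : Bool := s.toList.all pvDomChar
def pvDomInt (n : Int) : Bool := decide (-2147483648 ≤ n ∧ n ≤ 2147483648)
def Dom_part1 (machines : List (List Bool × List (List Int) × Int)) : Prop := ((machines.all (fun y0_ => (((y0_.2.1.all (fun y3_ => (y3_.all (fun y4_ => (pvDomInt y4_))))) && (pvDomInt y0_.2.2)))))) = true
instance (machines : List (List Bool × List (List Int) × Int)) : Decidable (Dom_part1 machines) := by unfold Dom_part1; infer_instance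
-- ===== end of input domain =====

-- B replaces A's per-machine breadth-first search over light-state tuples by a subset-XOR
-- dynamic programme on integer bitmasks (min #buttons whose masks XOR to the target);
-- objective: faster (no duplicated queue states, integer keys instead of bool tuples).

-- ===== PORT A =====

-- one BFS edge: the tuple-comprehension 'tuple(not light if i in button else light ...)'
def stepA (button : List Int) (state : List Bool) : List Bool :=
  (PySem.List.enumerate state).map (fun p => if p.1 ∈ button then !p.2 else p.2)

-- the 'while len(queue) > 0' loop; the Nat fuel only makes the recursion structural:
-- part1 passes (len(buttons)+2)*2^len(lights)+1, provably more steps than the loop can run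
def bfsAux (target : List Bool) (buttons : List (List Int)) :
    Nat → List (List Bool × Int) → PySem.Set (List Bool) → Option Int
  | _, [], _ => none
  | 0, _ :: _, _ => none
  | fuel + 1, (state, presses) :: queue, seen =>
    if state = target then some presses
    else if state ∈ seen then bfsAux target buttons fuel queue seen
    else bfsAux target buttons fuel
      (queue ++ buttons.map (fun button => (stepA button state, presses + 1)))
      (PySem.Set.add seen state)

def part1 (machines : List (List Bool × List (List Int) × Int)) : Int :=
  (machines.foldl (fun sols machine =>
    match bfsAux machine.1 machine.2.1
        ((machine.2.1.length + 2) * 2 ^ machine.1.length + 1)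
        [(List.replicate machine.1.length false, 0)] PySem.Set.empty with
    | some p => sols ++ [p]
    | none => sols) ([] : List Int)).sum

-- ===== PORT B =====

-- 'for l in reversed(lights): target = 2*target + (1 if l else 0)'
def encTargetB (lights : List Bool) : Nat :=
  lights.reverse.foldl (fun t l => 2 * t + (if l then 1 else 0)) 0

-- 'for i in reversed(range(n)): m = 2*m + (1 if i in button else 0)'
def maskOfB (n : Nat) (button : List Int) : Nat :=
  (PySem.List.pyRange 0 (n : Int) 1).reverse.foldl
    (fun m i => 2 * m + (if i ∈ button then 1 else 0)) 0

-- inner loop 'for x, c in best.items(): ...' building nd from the copy of best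
def dpStep (best : PySem.Dict Nat Nat) (m : Nat) : PySem.Dict Nat Nat :=
  best.items.foldl (fun nd p =>
    if ¬ (nd.contains (p.1 ^^^ m) = true) ∨ p.2 + 1 < nd.getD (p.1 ^^^ m) 0
    then nd.insert (p.1 ^^^ m) (p.2 + 1) else nd) best

def part1_alt (machines : List (List Bool × List (List Int) × Int)) : Int :=
  machines.foldl (fun total machine =>
    let lights := machine.1
    let buttons := machine.2.1
    let target := encTargetB lights
    let masks := buttons.foldl (fun acc button => acc ++ [maskOfB lights.length button]) []
    let best := masks.foldl dpStep (PySem.Dict.empty.insert 0 0)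
    if best.contains target then total + ((best.getD target 0 : Nat) : Int) else total) 0

-- ===== PRECONDITION & SPEC =====
def Spec_part1 (machines : List (List Bool × List (List Int) × Int)) (out : Int) : Prop := out = part1_alt machines
instance (machines : List (List Bool × List (List Int) × Int)) (out : Int) : Decidable (Spec_part1 machines out) := by unfold Spec_part1; infer_instance

-- ===== CLAIM (what is proved, stated in full; the proofs are below) =====
def Claim_equal_part1 : Prop := ∀ (machines : List (List Bool × List (List Int) × Int)), Dom_part1 machines → Spec_part1 machines (part1 machines)

-- ===== LEMMAS AND PROOFS =====

-- ---------- generic spec-layer definitions ----------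

def xorL (l : List Nat) : Nat := l.foldr (· ^^^ ·) 0

def encB (l : List Bool) : Nat := l.foldr (fun b acc => 2 * acc + (if b then 1 else 0)) 0

def indL (n : Nat) (button : List Int) : List Bool :=
  (List.range n).map (fun (i : Nat) => decide ((i : Int) ∈ button))

def applySeq (l : List (List Int)) (s : List Bool) : List Bool :=
  l.foldl (fun t b => stepA b t) s

def PathLen (B : List (List Int)) (s u : List Bool) (k : Nat) : Prop :=
  ∃ l, l.length = k ∧ (∀ b ∈ l, b ∈ B) ∧ applySeq l s = u

def RchS (B : List (List Int)) (s u : List Bool) : Prop := ∃ k, PathLen B s u k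

noncomputable def dN (B : List (List Int)) (s u : List Bool) : Nat :=
  sInf {k | PathLen B s u k}

def masksOf (n : Nat) (B : List (List Int)) : List Nat := B.map (fun b => encB (indL n b))

def omin : Option Nat → Option Nat → Option Nat
  | none, b => b
  | some a, none => some a
  | some a, some b => some (min a b)

def bl : List Nat → Nat → Option Nat
  | [], x => if x = 0 then some 0 else none
  | m :: ms, x => omin (bl ms x) ((bl ms (x ^^^ m)).map (· + 1))

def blAcc : List Nat → (Nat → Option Nat) → Nat → Option Nat
  | [], F, x => F x
  | m :: ms, F, x => blAcc ms (fun y => omin (F y) ((F (y ^^^ m)).map (· + 1))) x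

def allB : Nat → List (List Bool)
  | 0 => [[]]
  | n + 1 => (allB n).map (false :: ·) ++ (allB n).map (true :: ·)

def muQ (B : List (List Int)) (n : Nat) (Q : List (List Bool × Int)) (S : PySem.Set (List Bool)) : Nat :=
  (B.length + 2) * ((allB n).countP (fun v => decide (v ∉ S))) + Q.length

def MonoQ (Q : List (List Bool × Int)) : Prop :=
  ∃ (k : Nat) (Qa Qb : List (List Bool × Int)), Q = Qa ++ Qb ∧
    (∀ e ∈ Qa, e.2 = (k : Int)) ∧ (∀ e ∈ Qb, e.2 = (k : Int) + 1)

def InvQ (B : List (List Int)) (target : List Bool)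
    (Q : List (List Bool × Int)) (S : PySem.Set (List Bool)) : Prop :=
  (∀ e ∈ Q, e.1.length = target.length) ∧
  MonoQ Q ∧
  (∀ e ∈ Q, RchS B (List.replicate target.length false) e.1 ∧
    ((dN B (List.replicate target.length false) e.1 : Nat) : Int) ≤ e.2) ∧
  (∀ v ∈ S, RchS B (List.replicate target.length false) v ∧
    ∀ e ∈ Q, ((dN B (List.replicate target.length false) v : Nat) : Int) ≤ e.2) ∧
  (∀ u, RchS B (List.replicate target.length false) u → u ∉ S →
    ∃ e ∈ Q, e.1 ∉ S ∧ e.2 = ((dN B (List.replicate target.length false) e.1 : Nat) : Int) ∧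
      RchS B e.1 u ∧
      dN B (List.replicate target.length false) e.1 + dN B e.1 u =
        dN B (List.replicate target.length false) u) ∧
  target ∉ S

-- ---------- path/metric lemmas ----------

theorem applySeq_append (l₁ l₂ : List (List Int)) (s : List Bool) :
    applySeq (l₁ ++ l₂) s = applySeq l₂ (applySeq l₁ s) := by
  simp [applySeq, List.foldl_append]

theorem length_stepA (b : List Int) (s : List Bool) : (stepA b s).length = s.length := by
  simp [stepA, PySem.List.length_enumerate]

theorem length_applySeq : ∀ (l : List (List Int)) (s : List Bool),
    (applySeq l s).length = s.length := by
  intro l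
  induction l with
  | nil => intro s; rfl
  | cons b l ih => intro s; simpa [applySeq, length_stepA] using (ih (stepA b s)).trans (length_stepA b s)

theorem pathLen_refl (B : List (List Int)) (s : List Bool) : PathLen B s s 0 :=
  ⟨[], rfl, by simp, rfl⟩

theorem pathLen_trans {B : List (List Int)} {s t u : List Bool} {k j : Nat}
    (h1 : PathLen B s t k) (h2 : PathLen B t u j) : PathLen B s u (k + j) := by
  obtain ⟨l1, hl1, hm1, ha1⟩ := h1
  obtain ⟨l2, hl2, hm2, ha2⟩ := h2
  refine ⟨l1 ++ l2, by simp [hl1, hl2], ?_, by rw [applySeq_append, ha1, ha2]⟩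
  intro b hb
  rcases List.mem_append.mp hb with h | h
  · exact hm1 b h
  · exact hm2 b h

theorem pathLen_zero_iff {B : List (List Int)} {s u : List Bool} :
    PathLen B s u 0 ↔ u = s := by
  constructor
  · rintro ⟨l, hl, -, ha⟩
    rw [List.length_eq_zero_iff] at hl
    subst hl; exact ha.symm
  · rintro rfl; exact pathLen_refl _ _

theorem pathLen_cons_iff {B : List (List Int)} {s u : List Bool} {k : Nat} :
    PathLen B s u (k + 1) ↔ ∃ b ∈ B, PathLen B (stepA b s) u k := by
  constructor
  · rintro ⟨l, hl, hm, ha⟩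
    cases l with
    | nil => simp at hl
    | cons b l' =>
      refine ⟨b, hm b (by simp), l', by simpa using hl, fun c hc => hm c (by simp [hc]), ?_⟩
      simpa [applySeq] using ha
  · rintro ⟨b, hb, l', hl, hm, ha⟩
    refine ⟨b :: l', by simp [hl], ?_, by simpa [applySeq] using ha⟩
    rintro c hc
    rcases List.mem_cons.mp hc with rfl | h
    · exact hb
    · exact hm c h

theorem dN_le {B : List (List Int)} {s u : List Bool} {k : Nat}
    (h : PathLen B s u k) : dN B s u ≤ k := Nat.sInf_le h

theorem dN_spec {B : List (List Int)} {s u : List Bool}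
    (h : RchS B s u) : PathLen B s u (dN B s u) := Nat.sInf_mem h

theorem dN_self (B : List (List Int)) (s : List Bool) : dN B s s = 0 :=
  Nat.le_antisymm (dN_le (pathLen_refl B s)) (Nat.zero_le _)

theorem dN_eq_zero {B : List (List Int)} {s u : List Bool}
    (h : RchS B s u) (h0 : dN B s u = 0) : u = s :=
  pathLen_zero_iff.mp (h0 ▸ dN_spec h)

theorem rch_refl (B : List (List Int)) (s : List Bool) : RchS B s s := ⟨0, pathLen_refl B s⟩

theorem rch_trans {B : List (List Int)} {s t u : List Bool}
    (h1 : RchS B s t) (h2 : RchS B t u) : RchS B s u := by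
  obtain ⟨k, h1⟩ := h1; obtain ⟨j, h2⟩ := h2
  exact ⟨k + j, pathLen_trans h1 h2⟩

theorem rch_step {B : List (List Int)} {b : List Int} (hb : b ∈ B) (s : List Bool) :
    RchS B s (stepA b s) :=
  ⟨1, pathLen_cons_iff.mpr ⟨b, hb, pathLen_refl B _⟩⟩

theorem dN_step {B : List (List Int)} {b : List Int} (hb : b ∈ B) (s : List Bool) :
    dN B s (stepA b s) ≤ 1 :=
  dN_le (pathLen_cons_iff.mpr ⟨b, hb, pathLen_refl B _⟩)

theorem dN_triangle {B : List (List Int)} {s t u : List Bool}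
    (h1 : RchS B s t) (h2 : RchS B t u) : dN B s u ≤ dN B s t + dN B t u :=
  dN_le (pathLen_trans (dN_spec h1) (dN_spec h2))

theorem dN_geodesic {B : List (List Int)} {s u : List Bool} {k : Nat}
    (h : RchS B s u) (hk : dN B s u = k + 1) :
    ∃ b ∈ B, RchS B (stepA b s) u ∧ dN B (stepA b s) u = k := by
  have hp := dN_spec h
  rw [hk] at hp
  obtain ⟨b, hb, hp'⟩ := pathLen_cons_iff.mp hp
  refine ⟨b, hb, ⟨k, hp'⟩, ?_⟩
  have hle : dN B (stepA b s) u ≤ k := dN_le hp'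
  have := dN_le (pathLen_cons_iff.mpr ⟨b, hb, dN_spec ⟨k, hp'⟩⟩)
  omega

-- ---------- allB / counting ----------

theorem mem_allB : ∀ (n : Nat) (v : List Bool), v ∈ allB n ↔ v.length = n := by
  intro n
  induction n with
  | zero => intro v; cases v <;> simp [allB]
  | succ n ih =>
    intro v
    cases v with
    | nil => simp [allB]
    | cons a t => cases a <;> simp [allB, ih]

theorem nodup_allB : ∀ n : Nat, (allB n).Nodup := by
  intro n
  induction n with
  | zero => simp [allB]
  | succ n ih =>
    refine List.Nodup.append (ih.map (fun x y h => by simpa using h))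
      (ih.map (fun x y h => by simpa using h)) ?_
    intro v hv hv'
    simp only [List.mem_map] at hv hv'
    obtain ⟨x, -, rfl⟩ := hv
    obtain ⟨y, -, h⟩ := hv'
    simp at h

theorem length_allB : ∀ n : Nat, (allB n).length = 2 ^ n := by
  intro n
  induction n with
  | zero => rfl
  | succ n ih => simp [allB, ih]; ring

theorem countP_add_one (l : List (List Bool)) (hnd : l.Nodup) (s : List Bool) (hs : s ∈ l)
    (S : PySem.Set (List Bool)) (hsS : s ∉ S) :
    l.countP (fun v => decide (v ∉ PySem.Set.add S s)) + 1 =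
      l.countP (fun v => decide (v ∉ S)) := by
  induction l with
  | nil => simp at hs
  | cons a t ih =>
    rcases List.mem_cons.mp hs with hsa | hst
    · subst hsa
      have hat : s ∉ t := (List.nodup_cons.mp hnd).1
      have hcong : t.countP (fun v => decide (v ∉ PySem.Set.add S s)) =
          t.countP (fun v => decide (v ∉ S)) := by
        apply List.countP_congr
        intro v hv
        have hva : v ≠ s := fun h => hat (h ▸ hv)
        simp [hva]
      rw [List.countP_cons, List.countP_cons, hcong]
      simp [PySem.Set.mem_add, hsS]
    · have hnd' := (List.nodup_cons.mp hnd).2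
      have has : a ≠ s := fun h => (List.nodup_cons.mp hnd).1 (h ▸ hst)
      rw [List.countP_cons, List.countP_cons, ← ih hnd' hst]
      have : (decide (a ∉ PySem.Set.add S s)) = (decide (a ∉ S)) := by
        simp [PySem.Set.mem_add, has]
      rw [this]; omega

-- ---------- queue-shape lemmas ----------

theorem mono_head {s : List Bool} {p : Int} {Q' : List (List Bool × Int)}
    (h : MonoQ ((s, p) :: Q')) : 0 ≤ p ∧ ∀ e ∈ (s, p) :: Q', p ≤ e.2 := by
  obtain ⟨k, Qa, Qb, hQ, ha, hb⟩ := h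
  cases Qa with
  | nil =>
    rw [List.nil_append] at hQ
    have hp : p = (k : Int) + 1 := by
      have := hb (s, p) (by rw [← hQ]; exact List.mem_cons_self ..)
      simpa using this
    refine ⟨by omega, ?_⟩
    intro e he
    have : e ∈ Qb := by rw [← hQ]; exact he
    have := hb e this
    omega
  | cons a Qa' =>
    rw [List.cons_append] at hQ
    obtain ⟨h1, h2⟩ := List.cons_eq_cons.mp hQ
    have hp : p = (k : Int) := by
      have := ha a (List.mem_cons_self ..)
      rw [← h1] at this; simpa using this
    refine ⟨by omega, ?_⟩
    intro e he
    rcases List.mem_cons.mp he with rfl | he'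
    · exact le_refl _
    · rw [h2] at he'
      rcases List.mem_append.mp he' with h' | h'
      · have := ha e (List.mem_cons_of_mem _ h'); omega
      · have := hb e h'; omega

theorem mono_extend {s : List Bool} {p : Int} {Q' new : List (List Bool × Int)}
    (h : MonoQ ((s, p) :: Q')) (hnew : ∀ e ∈ new, e.2 = p + 1) :
    MonoQ (Q' ++ new) := by
  obtain ⟨k, Qa, Qb, hQ, ha, hb⟩ := h
  cases Qa with
  | nil =>
    rw [List.nil_append] at hQ
    have hp : p = (k : Int) + 1 := by
      have := hb (s, p) (by rw [← hQ]; exact List.mem_cons_self ..)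
      simpa using this
    refine ⟨k + 1, Q', new, rfl, ?_, ?_⟩
    · intro e he
      have : e ∈ Qb := by rw [← hQ]; exact List.mem_cons_of_mem _ he
      have := hb e this
      push_cast; omega
    · intro e he
      have := hnew e he
      push_cast; omega
  | cons a Qa' =>
    rw [List.cons_append] at hQ
    obtain ⟨h1, h2⟩ := List.cons_eq_cons.mp hQ
    have hp : p = (k : Int) := by
      have := ha a (List.mem_cons_self ..)
      rw [← h1] at this; simpa using this
    refine ⟨k, Qa', Qb ++ new, by rw [h2, List.append_assoc], ?_, ?_⟩
    · intro e he
      exact ha e (List.mem_cons_of_mem _ he)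
    · intro e he
      rcases List.mem_append.mp he with h' | h'
      · exact hb e h'
      · rw [hnew e h', hp]

theorem mono_tail {s : List Bool} {p : Int} {Q' : List (List Bool × Int)}
    (h : MonoQ ((s, p) :: Q')) : MonoQ Q' := by
  have := mono_extend h (new := []) (by simp)
  simpa using this

-- ---------- the BFS master lemma ----------

theorem bfs_master (B : List (List Int)) (target : List Bool) :
    ∀ (fuel : Nat) (Q : List (List Bool × Int)) (S : PySem.Set (List Bool)),
      InvQ B target Q S → muQ B target.length Q S ≤ fuel →
      ((RchS B (List.replicate target.length false) target →
          bfsAux target B fuel Q S =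
            some ((dN B (List.replicate target.length false) target : Nat) : Int)) ∧
       (¬ RchS B (List.replicate target.length false) target →
          bfsAux target B fuel Q S = none)) := by
  intro fuel
  induction fuel with
  | zero =>
    intro Q S hInv hmu
    cases Q with
    | nil =>
      constructor
      · intro hRS
        obtain ⟨e, he, -⟩ := hInv.2.2.2.2.1 target hRS hInv.2.2.2.2.2
        simp at he
      · intro _; rfl
    | cons e Q' =>
      exfalso
      unfold muQ at hmu
      simp [List.length_cons] at hmu
  | succ fuel ih =>
    intro Q S hInv hmu
    cases Q with
    | nil =>
      constructor
      · intro hRS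
        obtain ⟨e, he, -⟩ := hInv.2.2.2.2.1 target hRS hInv.2.2.2.2.2
        simp at he
      · intro _; rfl
    | cons e Q' =>
      obtain ⟨s, p⟩ := e
      obtain ⟨hlen, hmono, hsound, hseen, hcomp, htns⟩ := hInv
      by_cases hst : s = target
      · -- the popped state is the target: return presses
        subst hst
        have h1 : ((dN B (List.replicate s.length false) s : Nat) : Int) ≤ p :=
          (hsound (s, p) (List.mem_cons_self ..)).2
        constructor
        · intro hRS
          simp only [bfsAux, eq_self_iff_true, if_true]
          congr 1
          obtain ⟨e2, he2, -, he2d, -, he2sum⟩ := hcomp s hRS htns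
          have hminp := (mono_head hmono).2 e2 he2
          have hd2 : dN B (List.replicate s.length false) e2.1 ≤
              dN B (List.replicate s.length false) s := by omega
          omega
        · intro hRS
          exact absurd (hsound (s, p) (List.mem_cons_self ..)).1 hRS
      · by_cases hseenQ : s ∈ S
        · -- already seen: skip the entry
          have hInv' : InvQ B target Q' S := by
            refine ⟨fun e he => hlen e (List.mem_cons_of_mem _ he), mono_tail hmono,
              fun e he => hsound e (List.mem_cons_of_mem _ he),
              fun v hv => ⟨(hseen v hv).1, fun e he => (hseen v hv).2 e (List.mem_cons_of_mem _ he)⟩,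
              ?_, htns⟩
            intro u hu hus
            obtain ⟨e2, he2, he2ns, h3, h4, h5⟩ := hcomp u hu hus
            refine ⟨e2, ?_, he2ns, h3, h4, h5⟩
            rcases List.mem_cons.mp he2 with hh | hh
            · exfalso
              rw [hh] at he2ns
              exact he2ns hseenQ
            · exact hh
          have hmu' : muQ B target.length Q' S ≤ fuel := by
            unfold muQ at hmu ⊢
            simp only [List.length_cons] at hmu
            omega
          have hres := ih Q' S hInv' hmu'
          constructor
          · intro hRS
            simp only [bfsAux, if_neg hst, if_pos hseenQ]
            exact hres.1 hRS
          · intro hRS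
            simp only [bfsAux, if_neg hst, if_pos hseenQ]
            exact hres.2 hRS
        · -- fresh state: expand it
          have hhead := hsound (s, p) (List.mem_cons_self ..)
          have hRs : RchS B (List.replicate target.length false) s := hhead.1
          have hd1 : ((dN B (List.replicate target.length false) s : Nat) : Int) ≤ p := hhead.2
          obtain ⟨e2, he2, he2ns, he2d, he2r, he2sum⟩ := hcomp s hRs hseenQ
          have hminp := (mono_head hmono).2 e2 he2
          have hp0 := (mono_head hmono).1
          have hpeq : p = ((dN B (List.replicate target.length false) s : Nat) : Int) := by
            omega
          have hnew2 : ∀ e ∈ B.map (fun b => (stepA b s, p + 1)), e.2 = p + 1 := by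
            intro e he
            obtain ⟨b, -, rfl⟩ := List.mem_map.mp he
            rfl
          have hInvn : InvQ B target (Q' ++ B.map (fun b => (stepA b s, p + 1)))
              (PySem.Set.add S s) := by
            refine ⟨?_, mono_extend hmono hnew2, ?_, ?_, ?_, ?_⟩
            · -- lengths
              intro e he
              rcases List.mem_append.mp he with hh | hh
              · exact hlen e (List.mem_cons_of_mem _ hh)
              · obtain ⟨b, -, rfl⟩ := List.mem_map.mp hh
                show (stepA b s).length = target.length
                rw [length_stepA]
                exact hlen (s, p) (List.mem_cons_self ..)
            · -- soundness
              intro e he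
              rcases List.mem_append.mp he with hh | hh
              · exact hsound e (List.mem_cons_of_mem _ hh)
              · obtain ⟨b, hbB, rfl⟩ := List.mem_map.mp hh
                refine ⟨rch_trans hRs (rch_step hbB s), ?_⟩
                have ht1 := dN_triangle hRs (rch_step hbB s)
                have ht2 := dN_step hbB s
                show ((dN B (List.replicate target.length false) (stepA b s) : Nat) : Int) ≤ p + 1
                omega
            · -- seen entries below every queue entry
              intro v hv
              rcases (PySem.Set.mem_add _ _ _).mp hv with hvS | hvs
              · refine ⟨(hseen v hvS).1, ?_⟩
                intro e he
                rcases List.mem_append.mp he with hh | hh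
                · exact (hseen v hvS).2 e (List.mem_cons_of_mem _ hh)
                · rw [hnew2 e hh]
                  have := (hseen v hvS).2 (s, p) (List.mem_cons_self ..)
                  omega
              · subst hvs
                refine ⟨hRs, ?_⟩
                intro e he
                rcases List.mem_append.mp he with hh | hh
                · have := (mono_head hmono).2 e (List.mem_cons_of_mem _ hh)
                  omega
                · rw [hnew2 e hh]
                  omega
            · -- completeness
              intro u hu hun
              have hunS : u ∉ S := fun h => hun ((PySem.Set.mem_add _ _ _).mpr (Or.inl h))
              have hune : u ≠ s := fun h => hun ((PySem.Set.mem_add _ _ _).mpr (Or.inr h))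
              obtain ⟨e2', he2', he2ns', he2d', he2r', he2sum'⟩ := hcomp u hu hunS
              by_cases hes : e2'.1 = s
              · rw [hes] at he2d' he2r' he2sum'
                have hrsu : RchS B s u := he2r'
                have hm0 : dN B s u ≠ 0 := fun h0 => hune (dN_eq_zero hrsu h0)
                obtain ⟨m', hm'⟩ : ∃ m', dN B s u = m' + 1 := ⟨dN B s u - 1, by omega⟩
                obtain ⟨b, hbB, hrs2, hd2'⟩ := dN_geodesic hrsu hm'
                have hle2 : dN B (List.replicate target.length false) (stepA b s) ≤
                    dN B (List.replicate target.length false) s + 1 := by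
                  have ht1 := dN_triangle hRs (rch_step hbB s)
                  have ht2 := dN_step hbB s
                  omega
                have hge2 : dN B (List.replicate target.length false) s + 1 ≤
                    dN B (List.replicate target.length false) (stepA b s) := by
                  have htri := dN_triangle (rch_trans hRs (rch_step hbB s)) hrs2
                  omega
                refine ⟨(stepA b s, p + 1),
                  List.mem_append.mpr (Or.inr (List.mem_map.mpr ⟨b, hbB, rfl⟩)), ?_, ?_, hrs2, ?_⟩
                · show stepA b s ∉ PySem.Set.add S s
                  intro hmem
                  rcases (PySem.Set.mem_add _ _ _).mp hmem with hS' | hs'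
                  · have hxx : ((dN B (List.replicate target.length false) (stepA b s) : Nat) : Int) ≤ p :=
                      (hseen _ hS').2 (s, p) (List.mem_cons_self ..)
                    omega
                  · rw [hs'] at hge2
                    omega
                · show p + 1 = ((dN B (List.replicate target.length false) (stepA b s) : Nat) : Int)
                  omega
                · show dN B (List.replicate target.length false) (stepA b s) + dN B (stepA b s) u =
                    dN B (List.replicate target.length false) u
                  omega
              · refine ⟨e2', ?_, ?_, he2d', he2r', he2sum'⟩
                · rcases List.mem_cons.mp he2' with hh | hh
                  · exfalso
                    apply hes
                    rw [hh]
                  · exact List.mem_append.mpr (Or.inl hh)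
                · intro hmem
                  rcases (PySem.Set.mem_add _ _ _).mp hmem with hS' | hs'
                  · exact he2ns' hS'
                  · exact hes hs'
            · -- target still unseen
              intro hmem
              rcases (PySem.Set.mem_add _ _ _).mp hmem with hS' | hs'
              · exact htns hS'
              · exact hst hs'.symm
          have hcnt := countP_add_one (allB target.length) (nodup_allB _) s
            ((mem_allB _ s).mpr (hlen (s, p) (List.mem_cons_self ..))) S hseenQ
          have hmun : muQ B target.length (Q' ++ B.map (fun b => (stepA b s, p + 1)))
              (PySem.Set.add S s) ≤ fuel := by
            unfold muQ at hmu ⊢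
            simp only [List.length_cons, List.length_append, List.length_map] at hmu ⊢
            have hc : (allB target.length).countP (fun v => decide (v ∉ S)) =
                (allB target.length).countP (fun v => decide (v ∉ PySem.Set.add S s)) + 1 :=
              hcnt.symm
            rw [hc, Nat.mul_succ] at hmu
            omega
          have hres := ih _ _ hInvn hmun
          constructor
          · intro hRS
            simp only [bfsAux, if_neg hst, if_neg hseenQ]
            exact hres.1 hRS
          · intro hRS
            simp only [bfsAux, if_neg hst, if_neg hseenQ]
            exact hres.2 hRS

-- ---------- running the BFS from the initial state ----------

theorem bfs_run (B : List (List Int)) (lights : List Bool) :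
    (RchS B (List.replicate lights.length false) lights →
        bfsAux lights B ((B.length + 2) * 2 ^ lights.length + 1)
          [(List.replicate lights.length false, 0)] PySem.Set.empty =
          some ((dN B (List.replicate lights.length false) lights : Nat) : Int)) ∧
    (¬ RchS B (List.replicate lights.length false) lights →
        bfsAux lights B ((B.length + 2) * 2 ^ lights.length + 1)
          [(List.replicate lights.length false, 0)] PySem.Set.empty = none) := by
  apply bfs_master B lights
  · refine ⟨?_, ⟨0, [(List.replicate lights.length false, 0)], [], by simp, ?_, by simp⟩,
      ?_, ?_, ?_, ?_⟩
    · intro e he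
      rw [List.mem_singleton] at he
      rw [he]
      exact List.length_replicate
    · intro e he
      rw [List.mem_singleton] at he
      rw [he]
      simp
    · intro e he
      rw [List.mem_singleton] at he
      rw [he]
      exact ⟨rch_refl _ _, by simp [dN_self]⟩
    · intro v hv
      simp [PySem.Set.empty] at hv
    · intro u hu _
      refine ⟨(List.replicate lights.length false, 0), List.mem_singleton.mpr rfl, ?_, ?_, hu, ?_⟩
      · simp [PySem.Set.empty]
      · show (0 : Int) = ((dN B (List.replicate lights.length false)
          (List.replicate lights.length false) : Nat) : Int)
        simp [dN_self]
      · show dN B (List.replicate lights.length false) (List.replicate lights.length false) +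
          dN B (List.replicate lights.length false) u = dN B (List.replicate lights.length false) u
        rw [dN_self, Nat.zero_add]
    · simp [PySem.Set.empty]
  · unfold muQ
    have hc : (allB lights.length).countP (fun v => decide (v ∉ PySem.Set.empty)) =
        (allB lights.length).length := by
      apply List.countP_eq_length.mpr
      intro v _
      simp [PySem.Set.empty]
    rw [hc, length_allB]
    simp

-- ---------- encodings ----------

theorem encB_cons_bit (a : Bool) (s : List Bool) : encB (a :: s) = Nat.bit a (encB s) := by
  cases a <;> simp [encB, Nat.bit_val, Bool.toNat] <;> omega

theorem encTargetB_eq (lights : List Bool) : encTargetB lights = encB lights := by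
  simp [encTargetB, encB, List.foldl_reverse]

theorem encB_replicate (n : Nat) : encB (List.replicate n false) = 0 := by
  induction n with
  | zero => rfl
  | succ n ih => simp [List.replicate_succ, encB] at ih ⊢; omega

theorem length_indL (n : Nat) (b : List Int) : (indL n b).length = n := by
  simp [indL]

theorem encB_zipWith_xor : ∀ (s t : List Bool), s.length = t.length →
    encB (List.zipWith xor s t) = encB s ^^^ encB t := by
  intro s
  induction s with
  | nil =>
    intro t h
    cases t with
    | nil => rfl
    | cons b t => simp at h
  | cons a s ih =>
    intro t h
    cases t with
    | nil => simp at h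
    | cons b t =>
      simp only [List.zipWith_cons_cons, encB_cons_bit]
      rw [ih t (by simpa using h), Nat.xor_bit]

theorem encB_inj : ∀ (s t : List Bool), s.length = t.length → encB s = encB t → s = t := by
  intro s
  induction s with
  | nil =>
    intro t h _
    cases t with
    | nil => rfl
    | cons b t => simp at h
  | cons a s ih =>
    intro t hlen henc
    cases t with
    | nil => simp at hlen
    | cons b t =>
      simp only [encB] at henc
      have hab : a = b ∧ encB s = encB t := by
        cases a <;> cases b <;> simp_all [encB] <;> omega
      rw [hab.1, ih t (by simpa using hlen) hab.2]

theorem maskOfB_eq (n : Nat) (b : List Int) : maskOfB n b = encB (indL n b) := by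
  rw [maskOfB, encB, indL, List.foldl_reverse, PySem.List.pyRange_one, List.foldr_map,
    List.foldr_map]
  simp

theorem stepA_eq_zipWith (b : List Int) (s : List Bool) :
    stepA b s = List.zipWith xor s (indL s.length b) := by
  apply List.ext_getElem
  · simp [length_stepA, length_indL]
  · intro i h1 h2
    simp only [stepA, List.getElem_map, PySem.List.getElem_enumerate, indL,
      List.getElem_zipWith, List.getElem_range, zero_add]
    by_cases hm : (i : Int) ∈ b
    · rw [if_pos hm]
      simp [hm]
    · rw [if_neg hm]
      simp [hm]

theorem encB_stepA (b : List Int) (s : List Bool) :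
    encB (stepA b s) = encB s ^^^ encB (indL s.length b) := by
  rw [stepA_eq_zipWith, encB_zipWith_xor s _ (by rw [length_indL])]

theorem xorL_cons (a : Nat) (l : List Nat) : xorL (a :: l) = a ^^^ xorL l := rfl

theorem encB_applySeq : ∀ (l : List (List Int)) (s : List Bool),
    encB (applySeq l s) = xorL (l.map (fun b => encB (indL s.length b))) ^^^ encB s := by
  intro l
  induction l with
  | nil => intro s; simp [applySeq, xorL]
  | cons b l ih =>
    intro s
    have hstep : applySeq (b :: l) s = applySeq l (stepA b s) := rfl
    rw [hstep, ih (stepA b s), length_stepA, encB_stepA, List.map_cons, xorL_cons]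
    rw [Nat.xor_comm (encB s) (encB (indL s.length b)), ← Nat.xor_assoc,
      Nat.xor_comm (xorL (List.map (fun b => encB (indL s.length b)) l)) (encB (indL s.length b)),
      Nat.xor_assoc]

-- ---------- mask sequences ↔ paths ----------

theorem mseq_of_path {B : List (List Int)} {u : List Bool} {k n : Nat}
    (hp : PathLen B (List.replicate n false) u k) :
    ∃ l', l'.length = k ∧ (∀ m ∈ l', m ∈ masksOf n B) ∧ xorL l' = encB u := by
  obtain ⟨l, hl, hm, ha⟩ := hp
  refine ⟨l.map (fun b => encB (indL n b)), by simp [hl], ?_, ?_⟩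
  · intro m hmem
    obtain ⟨b, hb, rfl⟩ := List.mem_map.mp hmem
    exact List.mem_map.mpr ⟨b, hm b hb, rfl⟩
  · have := encB_applySeq l (List.replicate n false)
    rw [ha, encB_replicate, Nat.xor_zero, List.length_replicate] at this
    exact this.symm

theorem preimage_list {α β : Type} (f : α → β) (L : List α) :
    ∀ (l' : List β), (∀ m ∈ l', m ∈ L.map f) →
      ∃ pl : List α, pl.map f = l' ∧ pl.length = l'.length ∧ ∀ b ∈ pl, b ∈ L := by
  intro l'
  induction l' with
  | nil => intro _; exact ⟨[], rfl, rfl, by simp⟩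
  | cons m l' ih =>
    intro hmem
    obtain ⟨b, hb, rfl⟩ := List.mem_map.mp (hmem m (by simp))
    obtain ⟨pl, h1, h2, h3⟩ := ih (fun x hx => hmem x (by simp [hx]))
    refine ⟨b :: pl, by simp [h1], by simp [h2], ?_⟩
    rintro c hc
    rcases List.mem_cons.mp hc with rfl | h
    · exact hb
    · exact h3 c h

theorem path_of_mseq {B : List (List Int)} {u : List Bool} {n : Nat}
    (hu : u.length = n) (l' : List Nat) (hmem : ∀ m ∈ l', m ∈ masksOf n B)
    (hxor : xorL l' = encB u) :
    PathLen B (List.replicate n false) u l'.length := by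
  obtain ⟨pl, h1, h2, h3⟩ := preimage_list _ B l' hmem
  refine ⟨pl, h2, h3, ?_⟩
  have henc := encB_applySeq pl (List.replicate n false)
  rw [encB_replicate, Nat.xor_zero, List.length_replicate, h1, hxor] at henc
  exact encB_inj _ _ (by rw [length_applySeq, List.length_replicate, hu]) henc

-- ---------- xor collapse: sequences to sublists ----------

theorem xorL_perm {l l' : List Nat} (h : l.Perm l') : xorL l = xorL l' :=
  List.Perm.foldr_eq h 0

theorem collapse (ms : List Nat) : ∀ (l : List Nat), (∀ a ∈ l, a ∈ ms) →
    ∃ s, s.Sublist ms ∧ xorL s = xorL l ∧ s.length ≤ l.length := by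
  intro l
  induction hn : l.length using Nat.strong_induction_on generalizing l with
  | _ N ih =>
  intro hmem
  by_cases hnd : l.Nodup
  · obtain ⟨t, hperm, hsub⟩ := List.subperm_of_subset hnd hmem
    exact ⟨t, hsub, xorL_perm hperm, by rw [hperm.length_eq]; omega⟩
  · obtain ⟨a, hdup⟩ := List.exists_duplicate_iff_not_nodup.mpr hnd
    have ham : a ∈ l := hdup.mem
    have hcount : 2 ≤ l.count a := List.duplicate_iff_two_le_count.mp hdup
    have ham2 : a ∈ l.erase a := by
      rw [← List.count_pos_iff, List.count_erase_self]
      omega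
    set r := (l.erase a).erase a with hr
    have hperm : l.Perm (a :: a :: r) :=
      (List.perm_cons_erase ham).trans ((List.perm_cons_erase ham2).cons a)
    have hxl : xorL l = xorL r := by
      rw [xorL_perm hperm]
      simp only [xorL, List.foldr_cons]
      rw [← Nat.xor_assoc, Nat.xor_self, Nat.zero_xor]
    have hlen : l.length = r.length + 2 := by
      rw [hperm.length_eq]; simp
    obtain ⟨s, hs1, hs2, hs3⟩ := ih r.length (by omega) r rfl
      (fun x hx => hmem x (List.mem_of_mem_erase (List.mem_of_mem_erase hx)))
    exact ⟨s, hs1, hs2.trans hxl.symm, by omega⟩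

-- ---------- bl (minimal sublist xor) lemmas ----------

theorem omin_none_right (a : Option Nat) : omin a none = a := by cases a <;> rfl

theorem omin_comm (a b : Option Nat) : omin a b = omin b a := by
  cases a <;> cases b <;> simp [omin, Nat.min_comm]

theorem omin_assoc (a b c : Option Nat) : omin (omin a b) c = omin a (omin b c) := by
  cases a <;> cases b <;> cases c <;> simp [omin, Nat.min_assoc]

theorem omin_left_comm (a b c : Option Nat) : omin a (omin b c) = omin b (omin a c) := by
  rw [← omin_assoc, omin_comm a b, omin_assoc]

theorem omin_map_succ (a b : Option Nat) :
    (omin a b).map (· + 1) = omin (a.map (· + 1)) (b.map (· + 1)) := by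
  cases a <;> cases b <;> simp [omin] <;> omega

theorem bl_snoc (ms : List Nat) (m : Nat) : ∀ x,
    bl (ms ++ [m]) x = omin (bl ms x) ((bl ms (x ^^^ m)).map (· + 1)) := by
  induction ms with
  | nil =>
    intro x
    simp [bl, omin_comm]
  | cons a ms ih =>
    intro x
    show omin (bl (ms ++ [m]) x) ((bl (ms ++ [m]) (x ^^^ a)).map (· + 1)) = _
    rw [ih x, ih (x ^^^ a), omin_map_succ]
    show _ = omin (omin (bl ms x) ((bl ms (x ^^^ a)).map (· + 1)))
      ((omin (bl ms (x ^^^ m)) ((bl ms (x ^^^ m ^^^ a)).map (· + 1))).map (· + 1))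
    rw [omin_map_succ]
    have hxx : x ^^^ a ^^^ m = x ^^^ m ^^^ a := by
      rw [Nat.xor_assoc, Nat.xor_assoc, Nat.xor_comm a m]
    rw [hxx]
    rw [omin_assoc, omin_assoc]
    congr 1
    rw [omin_left_comm]

theorem xorNat_mcancel (m x : Nat) : m ^^^ (x ^^^ m) = x := by
  rw [Nat.xor_comm x m, ← Nat.xor_assoc, Nat.xor_self, Nat.zero_xor]

theorem xorNat_peel {m t x : Nat} (h : m ^^^ t = x) : t = x ^^^ m := by
  rw [← h, Nat.xor_comm m t, Nat.xor_assoc, Nat.xor_self, Nat.xor_zero]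

theorem bl_sound : ∀ (ms : List Nat) (x c : Nat), bl ms x = some c →
    ∃ s, s.Sublist ms ∧ xorL s = x ∧ s.length = c := by
  intro ms
  induction ms with
  | nil =>
    intro x c h
    by_cases hx : x = 0
    · subst hx
      simp [bl] at h
      exact ⟨[], List.Sublist.refl _, rfl, by simp [xorL, ← h]⟩
    · simp [bl, hx] at h
  | cons m ms ih =>
    intro x c h
    rw [bl] at h
    rcases hA : bl ms x with _ | c1 <;> rcases hB : bl ms (x ^^^ m) with _ | c2 <;>
        rw [hA, hB] at h <;> simp only [omin, Option.map_none, Option.map_some,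
          Option.some.injEq] at h
    · exact absurd h (by simp)
    · obtain ⟨s, hs1, hs2, hs3⟩ := ih _ _ hB
      refine ⟨m :: s, hs1.cons₂ m, ?_, ?_⟩
      · rw [xorL_cons, hs2, xorNat_mcancel]
      · simp only [List.length_cons, hs3]
        simpa using h
    · obtain ⟨s, hs1, hs2, hs3⟩ := ih _ _ hA
      exact ⟨s, hs1.cons m, hs2, by omega⟩
    · rcases Nat.le_total c1 (c2 + 1) with hle | hle
      · obtain ⟨s, hs1, hs2, hs3⟩ := ih _ _ hA
        exact ⟨s, hs1.cons m, hs2, by omega⟩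
      · obtain ⟨s, hs1, hs2, hs3⟩ := ih _ _ hB
        refine ⟨m :: s, hs1.cons₂ m, ?_, ?_⟩
        · rw [xorL_cons, hs2, xorNat_mcancel]
        · simp only [List.length_cons, hs3]
          omega

theorem bl_none : ∀ (ms : List Nat) (x : Nat), bl ms x = none →
    ∀ s, s.Sublist ms → xorL s ≠ x := by
  intro ms
  induction ms with
  | nil =>
    intro x h s hs
    have hnil : s = [] := List.sublist_nil.mp hs
    subst hnil
    by_cases hx : x = 0
    · subst hx; simp [bl] at h
    · intro hc
      exact hx ((by simp [xorL] at hc; omega : (0:Nat) = x) ▸ rfl)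
  | cons m ms ih =>
    intro x h s hs
    rw [bl] at h
    rcases hA : bl ms x with _ | c1 <;> rcases hB : bl ms (x ^^^ m) with _ | c2 <;>
        rw [hA, hB] at h
    · rcases List.sublist_cons_iff.mp hs with h' | ⟨r, rfl, hr⟩
      · exact ih x hA s h'
      · intro hc
        rw [xorL_cons] at hc
        exact ih (x ^^^ m) hB r hr (xorNat_peel hc)
    · simp [omin] at h
    · simp [omin] at h
    · simp [omin] at h

theorem bl_min : ∀ (ms : List Nat) (x c : Nat), bl ms x = some c →
    ∀ s, s.Sublist ms → xorL s = x → c ≤ s.length := by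
  intro ms
  induction ms with
  | nil =>
    intro x c h s hs hx
    by_cases h0 : x = 0 <;> simp [bl, h0] at h
    omega
  | cons m ms ih =>
    intro x c h s hs hx
    rw [bl] at h
    rcases List.sublist_cons_iff.mp hs with h' | ⟨r, rfl, hr⟩
    · rcases hA : bl ms x with _ | c1
      · exact absurd hx (bl_none ms x hA s h')
      · have hc1 := ih x c1 hA s h' hx
        rw [hA] at h
        rcases hB : bl ms (x ^^^ m) with _ | c2 <;> rw [hB] at h <;>
          simp only [omin, Option.map_none, Option.map_some, Option.some.injEq] at h <;> omega
    · have hxr : xorL r = x ^^^ m := by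
        rw [xorL_cons] at hx
        exact xorNat_peel hx
      rcases hB : bl ms (x ^^^ m) with _ | c2
      · exact absurd hxr (bl_none ms _ hB r hr)
      · have hc2 := ih _ c2 hB r hr hxr
        rw [hB] at h
        rcases hA : bl ms x with _ | c1 <;> rw [hA] at h <;>
            simp only [omin, Option.map_none, Option.map_some, Option.some.injEq] at h <;>
          simp only [List.length_cons] <;> omega

-- ---------- tie: bl on masks equals the BFS distance ----------

theorem bl_eq_dN (B : List (List Int)) (lights : List Bool) :
    (RchS B (List.replicate lights.length false) lights →
        bl (masksOf lights.length B) (encB lights) =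
          some (dN B (List.replicate lights.length false) lights)) ∧
    (¬ RchS B (List.replicate lights.length false) lights →
        bl (masksOf lights.length B) (encB lights) = none) := by
  constructor
  · intro h
    have hp := dN_spec h
    obtain ⟨l', hl1, hl2, hl3⟩ := mseq_of_path hp
    rcases hbl : bl (masksOf lights.length B) (encB lights) with _ | c
    · exfalso
      obtain ⟨s0, hs1, hs2, hs3⟩ := collapse (masksOf lights.length B) l' hl2
      exact bl_none _ _ hbl s0 hs1 (hs2.trans hl3)
    · congr 1
      obtain ⟨s0, hs1, hs2, hs3⟩ := collapse (masksOf lights.length B) l' hl2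
      have hcle : c ≤ s0.length := bl_min _ _ c hbl s0 hs1 (hs2.trans hl3)
      obtain ⟨s1, t1, t2, t3⟩ := bl_sound _ _ c hbl
      have hpath : PathLen B (List.replicate lights.length false) lights s1.length :=
        path_of_mseq rfl s1 (fun m hm => t1.subset hm) t2
      have hge := dN_le hpath
      omega
  · intro h
    rcases hbl : bl (masksOf lights.length B) (encB lights) with _ | c
    · rfl
    · exfalso
      obtain ⟨s1, t1, t2, t3⟩ := bl_sound _ _ c hbl
      exact h ⟨s1.length, path_of_mseq rfl s1 (fun m hm => t1.subset hm) t2⟩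

-- ---------- the dict DP computes bl ----------

theorem dp_fold_aux (m : Nat) :
    ∀ (L : List (Nat × Nat)) (nd D : PySem.Dict Nat Nat),
      (∀ k c, (k, c) ∈ L → D.get? k = some c) →
      (L.map (·.1)).Nodup →
      (∀ q, q ^^^ m ∈ L.map (·.1) → nd.get? q = D.get? q) →
      ∀ q, (L.foldl (fun nd p =>
          if ¬ (nd.contains (p.1 ^^^ m) = true) ∨ p.2 + 1 < nd.getD (p.1 ^^^ m) 0
          then nd.insert (p.1 ^^^ m) (p.2 + 1) else nd) nd).get? q
        = if q ^^^ m ∈ L.map (·.1) then omin (D.get? q) ((D.get? (q ^^^ m)).map (· + 1))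
          else nd.get? q := by
  intro L
  induction L with
  | nil =>
    intro nd D hitems hnd hagree q
    simp
  | cons pr L ih =>
    intro nd D hitems hnd hagree q
    obtain ⟨k, c⟩ := pr
    rw [List.foldl_cons]
    have hkeyL : k ∉ L.map (·.1) ∧ (L.map (·.1)).Nodup := by
      simpa [List.nodup_cons] using hnd
    have hitems' : ∀ k' c', (k', c') ∈ L → D.get? k' = some c' :=
      fun k' c' h' => hitems k' c' (List.mem_cons_of_mem _ h')
    have hagree' : ∀ q', q' ^^^ m ∈ L.map (·.1) →
        (if ¬ (nd.contains (k ^^^ m) = true) ∨ c + 1 < nd.getD (k ^^^ m) 0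
          then nd.insert (k ^^^ m) (c + 1) else nd).get? q' = D.get? q' := by
      intro q' hq'
      have hq'y : q' ≠ k ^^^ m := by
        intro hEq
        apply hkeyL.1
        have hqm : q' ^^^ m = k := by
          rw [hEq, Nat.xor_assoc, Nat.xor_self, Nat.xor_zero]
        rwa [← hqm]
      have hstep : (if ¬ (nd.contains (k ^^^ m) = true) ∨ c + 1 < nd.getD (k ^^^ m) 0
          then nd.insert (k ^^^ m) (c + 1) else nd).get? q' = nd.get? q' := by
        split
        · exact PySem.Dict.get?_insert_of_ne nd _ hq'y
        · rfl
      rw [hstep]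
      exact hagree q' (by simp only [List.map_cons]; exact List.mem_cons_of_mem _ hq')
    have hmain := ih _ D hitems' hkeyL.2 hagree' q
    by_cases hqk : q ^^^ m = k
    · have hqy : q = k ^^^ m := by
        rw [← hqk, Nat.xor_assoc, Nat.xor_self, Nat.xor_zero]
      have hnotinL : ¬ (q ^^^ m ∈ L.map (·.1)) := by
        rw [hqk]; exact hkeyL.1
      rw [hmain, if_neg hnotinL,
        if_pos (show q ^^^ m ∈ List.map (·.1) ((k, c) :: L) by simp [hqk])]
      have hDk : D.get? (q ^^^ m) = some c := by
        rw [hqk]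
        exact hitems k c (List.mem_cons_self ..)
      have hndq : nd.get? q = D.get? q := hagree q (by simp [hqk])
      rw [hDk, hqy]
      split
      · rename_i hcond
        rw [PySem.Dict.get?_insert_self]
        rw [PySem.Dict.contains_eq_isSome_get?, PySem.Dict.getD_eq_get?_getD, ← hqy, hndq] at hcond
        rcases hDq : D.get? q with _ | v
        · rw [← hqy, hDq]
          rfl
        · rw [← hqy, hDq]
          rw [hDq] at hcond
          simp only [Option.isSome_some, Option.getD_some] at hcond
          have hlt : c + 1 < v := by
            rcases hcond with hcond | hcond
            · simp at hcond
            · exact hcond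
          simp only [omin, Option.map_some]
          congr 1
          omega
      · rename_i hcond
        rw [PySem.Dict.contains_eq_isSome_get?, PySem.Dict.getD_eq_get?_getD, ← hqy, hndq] at hcond
        rw [← hqy, hndq]
        simp only [not_or, not_not] at hcond
        rcases hDq : D.get? q with _ | v
        · rw [hDq] at hcond
          simp at hcond
        · rw [hDq] at hcond
          simp only [Option.getD_some] at hcond
          simp only [omin, Option.map_some]
          congr 1
          omega
    · rw [hmain]
      by_cases hin : q ^^^ m ∈ L.map (·.1)
      · rw [if_pos hin, if_pos (show q ^^^ m ∈ List.map (·.1) ((k, c) :: L) by simp [hin])]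
      · rw [if_neg hin, if_neg (show ¬ (q ^^^ m ∈ List.map (·.1) ((k, c) :: L)) by simp [hqk, hin])]
        have hqy : q ≠ k ^^^ m := by
          intro hEq
          apply hqk
          rw [hEq, Nat.xor_assoc, Nat.xor_self, Nat.xor_zero]
        split
        · exact PySem.Dict.get?_insert_of_ne nd _ hqy
        · rfl

theorem dpStep_get? (D : PySem.Dict Nat Nat) (m : Nat) (hnd : D.keys.Nodup) :
    ∀ q, (dpStep D m).get? q = omin (D.get? q) ((D.get? (q ^^^ m)).map (· + 1)) := by
  intro q
  have hkeys : D.items.map (·.1) = D.keys := rfl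
  have hmain := dp_fold_aux m D.items D D
    (fun k c h => PySem.Dict.get?_of_mem_items D h hnd)
    (by rw [hkeys]; exact hnd) (fun q' _ => rfl) q
  rw [dpStep, hmain]
  by_cases hin : q ^^^ m ∈ D.items.map (·.1)
  · rw [if_pos hin]
  · rw [if_neg hin]
    have hnone : D.get? (q ^^^ m) = none :=
      (PySem.Dict.get?_eq_none_iff_not_mem_keys D _).mpr (by rwa [← hkeys])
    rw [hnone]
    simp [omin_none_right]

theorem dp_fold_nodup (m : Nat) : ∀ (L : List (Nat × Nat)) (nd : PySem.Dict Nat Nat),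
    nd.keys.Nodup →
    (L.foldl (fun nd p =>
        if ¬ (nd.contains (p.1 ^^^ m) = true) ∨ p.2 + 1 < nd.getD (p.1 ^^^ m) 0
        then nd.insert (p.1 ^^^ m) (p.2 + 1) else nd) nd).keys.Nodup := by
  intro L
  induction L with
  | nil => intro nd h; exact h
  | cons pr L ih =>
    intro nd h
    rw [List.foldl_cons]
    apply ih
    split
    · exact PySem.Dict.nodup_keys_insert _ _ _ h
    · exact h

theorem dpStep_nodup (D : PySem.Dict Nat Nat) (m : Nat) (hnd : D.keys.Nodup) :
    (dpStep D m).keys.Nodup := by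
  rw [dpStep]
  exact dp_fold_nodup m D.items D hnd

theorem dp_run : ∀ (ms : List Nat) (D : PySem.Dict Nat Nat) (F : Nat → Option Nat),
    D.keys.Nodup → (∀ x, D.get? x = F x) →
    ∀ x, (ms.foldl dpStep D).get? x = blAcc ms F x := by
  intro ms
  induction ms with
  | nil =>
    intro D F _ hx x
    exact hx x
  | cons m ms ih =>
    intro D F hnd hx x
    rw [List.foldl_cons]
    refine ih (dpStep D m) _ (dpStep_nodup D m hnd) ?_ x
    intro y
    rw [dpStep_get? D m hnd y, hx y, hx (y ^^^ m)]

theorem blAcc_bl : ∀ (ms acc : List Nat) (x : Nat), blAcc ms (bl acc) x = bl (acc ++ ms) x := by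
  intro ms
  induction ms with
  | nil => intro acc x; rw [blAcc, List.append_nil]
  | cons m ms ih =>
    intro acc x
    rw [blAcc]
    have hfun : (fun y => omin (bl acc y) ((bl acc (y ^^^ m)).map (· + 1))) = bl (acc ++ [m]) :=
      funext fun y => (bl_snoc acc m y).symm
    rw [hfun, ih (acc ++ [m]) x, List.append_assoc]
    rfl

theorem dp_final (ms : List Nat) (x : Nat) :
    (ms.foldl dpStep (PySem.Dict.empty.insert 0 0)).get? x = bl ms x := by
  have h0 : ∀ y, (PySem.Dict.empty.insert 0 0).get? y = bl [] y := by
    intro y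
    by_cases hy : y = 0
    · subst hy
      rw [PySem.Dict.get?_insert_self]
      rfl
    · rw [PySem.Dict.get?_insert_of_ne _ _ hy, PySem.Dict.get?_empty]
      simp [bl, hy]
  have := dp_run ms _ (bl []) (PySem.Dict.nodup_keys_insert _ _ _ PySem.Dict.nodup_keys_empty) h0 x
  rw [this, blAcc_bl]
  rfl

-- ---------- per-machine and top-level assembly ----------

theorem contribA_eq (lights : List Bool) (buttons : List (List Int)) :
    bfsAux lights buttons ((buttons.length + 2) * 2 ^ lights.length + 1)
      [(List.replicate lights.length false, 0)] PySem.Set.empty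
    = (bl (masksOf lights.length buttons) (encB lights)).map (fun (c : Nat) => (c : Int)) := by
  by_cases h : RchS buttons (List.replicate lights.length false) lights
  · rw [(bfs_run buttons lights).1 h, (bl_eq_dN buttons lights).1 h]; rfl
  · rw [(bfs_run buttons lights).2 h, (bl_eq_dN buttons lights).2 h]; rfl

theorem fold_eq : ∀ (machines : List (List Bool × List (List Int) × Int))
    (sols : List Int) (total : Int), total = sols.sum →
    (machines.foldl (fun sols machine =>
      match bfsAux machine.1 machine.2.1
          ((machine.2.1.length + 2) * 2 ^ machine.1.length + 1)
          [(List.replicate machine.1.length false, 0)] PySem.Set.empty with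
      | some p => sols ++ [p]
      | none => sols) sols).sum
    = machines.foldl (fun total machine =>
        let lights := machine.1
        let buttons := machine.2.1
        let target := encTargetB lights
        let masks := buttons.foldl (fun acc button => acc ++ [maskOfB lights.length button]) []
        let best := masks.foldl dpStep (PySem.Dict.empty.insert 0 0)
        if best.contains target then total + ((best.getD target 0 : Nat) : Int) else total) total := by
  intro machines
  induction machines with
  | nil =>
    intro sols total h
    simpa using h.symm
  | cons mach ms ih =>
    intro sols total h
    rw [List.foldl_cons, List.foldl_cons, contribA_eq mach.1 mach.2.1]
    have hmask : mach.2.1.foldl (fun acc button => acc ++ [maskOfB mach.1.length button]) [] =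
        masksOf mach.1.length mach.2.1 := by
      rw [PySem.List.foldl_append_singleton_eq_map, List.nil_append]
      unfold masksOf
      exact List.map_congr_left (fun b _ => maskOfB_eq _ b)
    have hBstep : (let lights := mach.1
        let buttons := mach.2.1
        let target := encTargetB lights
        let masks := buttons.foldl (fun acc button => acc ++ [maskOfB lights.length button]) []
        let best := masks.foldl dpStep (PySem.Dict.empty.insert 0 0)
        if best.contains target then total + ((best.getD target 0 : Nat) : Int) else total)
        = match (bl (masksOf mach.1.length mach.2.1) (encB mach.1)).map (fun (c : Nat) => (c : Int)) with
          | some p => total + p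
          | none => total := by
      simp only [hmask, encTargetB_eq]
      rw [PySem.Dict.contains_eq_isSome_get?, PySem.Dict.getD_eq_get?_getD, dp_final]
      rcases hbl : bl (masksOf mach.1.length mach.2.1) (encB mach.1) with _ | c
      · rfl
      · rfl
    rw [hBstep]
    rcases hbl : bl (masksOf mach.1.length mach.2.1) (encB mach.1) with _ | c
    · exact ih sols total h
    · exact ih (sols ++ [((c : Nat) : Int)]) (total + ((c : Nat) : Int)) (by simp [h])

-- ===== VERDICT (by name: the statement is the Claim_ definition above) =====
theorem part1_spec : Claim_equal_part1 := by
  intro machines _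
  unfold Spec_part1 part1 part1_alt
  exact fold_eq machines [] 0 rfl
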